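-- pv_equiv track=rewrite | github.com/sdss/datamodel | python/datamodel/generate/parse.py | remap_patterns
-- ===== SOURCE A (Python) =====
-- def remap_patterns(value: str) -> str:
--     """ Remaps regex search patterns for certain fields
--
--     Some paths have abutted keywords, i.e. "{br}{id}" or "{dr}{version}".
--     The default regex search pattern of ".+?" can sometimes handle these
--     but sometimes not. We replace certain fields with specific patterns
--     to help the extraction process.
--
--     Parameters
--     ----------
--     value : str
--         the input regex search pattern
--
--     Returns
--     -------
--     str
--         the new regex search pattern
--     """
--     # for cases with abutted kwargs, e.g. {camrow}{camcol}, {filter}{camcol}, {br}{id}, etc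
--     mapping = {'<dr>': "DR\\d{1,2}", '<br>': '[br]', '<id>': '.+?', "<camcol>": '[1-6]',
--                "<filter>": '[ugriz]'}
--
--     # loop over specific key names
--     for i in mapping:
--         if i not in value:
--             continue
--         # replace the pattern with the specific pattern
--         value = value.replace(f"{i}.+?", f"{i}{mapping.get(i, '.+?')}")
--     return value
-- ===== SOURCE B (Python) =====
-- def remap_patterns(value: str) -> str:
--     """Single left-to-right scan: at each position, if one of the five keyword
--     keyword search patterns starts here, emit the keyword plus its specific regex and jump
--     past it; otherwise copy the character. One pass instead of five sequential
--     str.replace passes."""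
--     mapping = {'<dr>': "DR\\d{1,2}", '<br>': '[br]', '<id>': '.+?', "<camcol>": '[1-6]',
--                "<filter>": '[ugriz]'}
--     out = []
--     i = 0
--     n = len(value)
--     while i < n:
--         for key, rep in mapping.items():
--             if value.startswith(key + '.+?', i):
--                 out.append(key + rep)
--                 i += len(key) + 3
--                 break
--         else:
--             out.append(value[i])
--             i += 1
--     return ''.join(out)
-- ===== Notes on version B (the rewrite author's own statement) =====
-- stated objective: alternative
-- what changed: Replaced the five sequential str.replace passes (one whole-string pass per dict key, each preceded by a membership test) by a single left-to-right scan that rewrites each abutted keyword pattern in place, building the output once.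
import Mathlib
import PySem

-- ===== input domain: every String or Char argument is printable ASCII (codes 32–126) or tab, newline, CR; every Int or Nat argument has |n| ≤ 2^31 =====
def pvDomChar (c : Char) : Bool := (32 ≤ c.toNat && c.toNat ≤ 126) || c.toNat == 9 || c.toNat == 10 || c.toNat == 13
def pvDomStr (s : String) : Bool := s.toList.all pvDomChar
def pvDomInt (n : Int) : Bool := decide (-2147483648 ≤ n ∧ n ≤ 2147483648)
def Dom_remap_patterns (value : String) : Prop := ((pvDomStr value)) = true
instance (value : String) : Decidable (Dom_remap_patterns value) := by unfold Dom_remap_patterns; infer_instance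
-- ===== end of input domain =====

-- B replaces A's five sequential str.replace passes by one left-to-right scan that rewrites
-- each "<key>.+?" occurrence in place (objective: alternative single-pass algorithm).

-- ===== PORT A =====
-- the dict literal 'mapping' of A
def pvMappingA : PySem.Dict String String :=
  PySem.Dict.ofList [("<dr>", "DR\\d{1,2}"), ("<br>", "[br]"), ("<id>", ".+?"),
                     ("<camcol>", "[1-6]"), ("<filter>", "[ugriz]")]

-- 'for i in mapping: if i not in value: continue; value = value.replace(i + ".+?", i + mapping.get(i, ".+?"))'
def remap_patterns (value : String) : String :=
  pvMappingA.keys.foldl (fun value i =>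
    if PySem.Str.isIn i value = false then value
    else PySem.Str.replace value (i ++ ".+?") (i ++ pvMappingA.getD i ".+?")) value

-- ===== PORT B =====
-- the (key, specific-pattern) table of Source B, as char lists, in dict order
def pvTable : List (List Char × List Char) :=
  [("<dr>".toList, "DR\\d{1,2}".toList), ("<br>".toList, "[br]".toList),
   ("<id>".toList, ".+?".toList), ("<camcol>".toList, "[1-6]".toList),
   ("<filter>".toList, "[ugriz]".toList)]

-- Source B's while-loop: at position i, the first key with value.startswith(key + '.+?', i) is
-- rewritten (emit key + rep, jump past the match), otherwise the character is copied.
-- Hand port (no PySem primitive for a scan loop); exact: List.find? tries the pairs in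
-- dict order like the for-loop, and the recursion advances i exactly as the while-loop does.
def pvScan (s : List Char) : List Char :=
  match s with
  | [] => []
  | c :: t =>
    match pvTable.find? (fun kr => (kr.1 ++ ('.' :: '+' :: '?' :: [])).isPrefixOf (c :: t)) with
    | some kr => (kr.1 ++ kr.2) ++ pvScan ((c :: t).drop (kr.1.length + 3))
    | none => c :: pvScan t
termination_by s.length
decreasing_by
  · simp only [List.length_drop, List.length_cons]; omega
  · simp

def remap_patterns_alt (value : String) : String := String.ofList (pvScan value.toList)

-- ===== PRECONDITION & SPEC =====
def Spec_remap_patterns (value : String) (out : String) : Prop := out = remap_patterns_alt value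
instance (value : String) (out : String) : Decidable (Spec_remap_patterns value out) := by unfold Spec_remap_patterns; infer_instance

-- ===== CLAIM (what is proved, stated in full; the proofs are below) =====
def Claim_equal_remap_patterns : Prop := ∀ (value : String), Dom_remap_patterns value → Spec_remap_patterns value (remap_patterns value)

-- ===== LEMMAS AND PROOFS =====

-- the five (full pattern, full replacement) pairs A's loop replaces, in loop order
def pvPats : List (List Char × List Char) :=
  pvTable.map (fun kr => (kr.1 ++ ('.' :: '+' :: '?' :: []), kr.1 ++ kr.2))

-- A's loop as a fold of replacements over char lists
def pvSeq (ps : List (List Char × List Char)) (s : List Char) : List Char :=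
  ps.foldl (fun v pr => PySem.Chars.replace v pr.1 pr.2) s

-- ---- equation lemmas for PySem.Chars.replace with a nonempty pattern ----

theorem pvGo_nil (p r acc : List Char) (fuel : Nat) :
    PySem.Chars.replace.go p r fuel [] acc = acc.reverse := by
  cases fuel <;> simp [PySem.Chars.replace.go]

theorem pvGo_succ (p1 : Char) (ptl r : List Char) (fuel : Nat) (c : Char) (t acc : List Char) :
    PySem.Chars.replace.go (p1::ptl) r (fuel+1) (c::t) acc =
      if (p1::ptl).isPrefixOf (c::t)
      then PySem.Chars.replace.go (p1::ptl) r fuel ((c::t).drop (p1::ptl).length) (r.reverse ++ acc)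
      else PySem.Chars.replace.go (p1::ptl) r fuel t (c :: acc) := by
  simp [PySem.Chars.replace.go]

theorem pvGo_spec (p1 : Char) (ptl r : List Char) :
    ∀ (fuel : Nat) (l acc : List Char), l.length ≤ fuel →
      PySem.Chars.replace.go (p1::ptl) r fuel l acc =
        acc.reverse ++ PySem.Chars.replace.go (p1::ptl) r l.length l [] := by
  intro fuel
  induction fuel using Nat.strong_induction_on with
  | _ fuel ih =>
    intro l acc hl
    cases l with
    | nil => simp [pvGo_nil]
    | cons c t =>
      cases fuel with
      | zero => simp at hl
      | succ f =>
        have hf : t.length ≤ f := by simp at hl; omega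
        rw [List.length_cons, pvGo_succ, pvGo_succ]
        by_cases hpre : (p1::ptl).isPrefixOf (c::t)
        · rw [if_pos hpre, if_pos hpre]
          have hd : ((c::t).drop (p1::ptl).length).length ≤ f := by
            simp only [List.length_drop, List.length_cons]; omega
          have hd' : ((c::t).drop (p1::ptl).length).length ≤ t.length := by
            simp only [List.length_drop, List.length_cons]; omega
          rw [ih f (by omega) _ _ hd, ih t.length (by omega) _ _ hd']
          simp
        · rw [if_neg hpre, if_neg hpre]
          rw [ih f (by omega) _ _ hf, ih t.length (by omega) t [c] (le_refl _)]
          simp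

theorem pvReplace_nil (p1 : Char) (ptl r : List Char) :
    PySem.Chars.replace [] (p1::ptl) r = [] := rfl

theorem pvReplace_cons_neg (p1 : Char) (ptl r : List Char) (c : Char) (t : List Char)
    (h : ¬ (p1::ptl) <+: (c::t)) :
    PySem.Chars.replace (c::t) (p1::ptl) r = c :: PySem.Chars.replace t (p1::ptl) r := by
  have hpre : (p1::ptl).isPrefixOf (c::t) = false := by
    rw [Bool.eq_false_iff]; intro hc; exact h (List.isPrefixOf_iff_prefix.mp hc)
  show PySem.Chars.replace.go (p1::ptl) r (c::t).length (c::t) [] = _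
  rw [List.length_cons, pvGo_succ, if_neg (by simp [hpre]),
    pvGo_spec p1 ptl r t.length t [c] (le_refl _)]
  rfl

theorem pvReplace_prefix (p1 : Char) (ptl r t : List Char) :
    PySem.Chars.replace ((p1::ptl) ++ t) (p1::ptl) r = r ++ PySem.Chars.replace t (p1::ptl) r := by
  have hpre : (p1::ptl).isPrefixOf ((p1::ptl) ++ t) = true :=
    List.isPrefixOf_iff_prefix.mpr (List.prefix_append _ _)
  show PySem.Chars.replace.go (p1::ptl) r ((p1::ptl) ++ t).length ((p1::ptl) ++ t) [] = _
  have hlen : ((p1::ptl) ++ t).length = (ptl.length + t.length) + 1 := by simp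
  have hcons : (p1::ptl) ++ t = p1 :: (ptl ++ t) := by simp
  rw [hlen, hcons, pvGo_succ, ← hcons, if_pos (by simp)]
  have hdrop : ((p1::ptl) ++ t).drop (p1::ptl).length = t := by simp
  rw [hdrop, pvGo_spec p1 ptl r _ t _ (by simp)]
  simp
  rfl

-- ---- replace is the identity when the key never occurs ----
theorem pvReplace_id (key : List Char) (p1 : Char) (ptl r : List Char)
    (hkp : key <+: (p1::ptl)) :
    ∀ s : List Char, ¬ key <:+: s → PySem.Chars.replace s (p1::ptl) r = s := by
  intro s
  induction s with
  | nil => intro _; rfl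
  | cons c t ih =>
    intro h
    have hnp : ¬ (p1::ptl) <+: (c::t) := by
      intro hp; exact h (List.IsPrefix.isInfix (hkp.trans hp))
    rw [pvReplace_cons_neg _ _ _ _ _ hnp, ih (fun hi => h (List.infix_cons hi))]

-- ---- a block whose interior has no '<' and whose front mismatches the pattern is inert ----
theorem pvBlocks_not_prefix (p u : List Char) (h2 : 2 ≤ p.length) (h2' : 2 ≤ u.length)
    (hne : p.take 2 ≠ u.take 2) : ∀ X, ¬ p <+: (u ++ X) := by
  intro X hp
  obtain ⟨v, hv⟩ := hp
  apply hne
  have : ((u ++ X).take 2) = u.take 2 := List.take_append_of_le_length h2'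
  rw [← this, ← hv, List.take_append_of_le_length h2]

theorem pvReplace_block (p1 : Char) (ptl r : List Char) (hp1 : p1 = '<') :
    ∀ (u t : List Char), u ≠ [] → (∀ ch ∈ u.tail, ch ≠ '<') →
      (¬ (p1::ptl) <+: (u ++ t)) →
      PySem.Chars.replace (u ++ t) (p1::ptl) r = u ++ PySem.Chars.replace t (p1::ptl) r := by
  intro u
  induction u with
  | nil => intro t h; simp at h
  | cons a u' ih =>
    intro t _ hint hnp
    have hnp2 : ¬ (p1::ptl) <+: (a :: (u' ++ t)) := by simpa using hnp
    rw [show (a::u') ++ t = a :: (u' ++ t) from rfl, pvReplace_cons_neg _ _ _ _ _ hnp2]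
    cases u' with
    | nil => simp
    | cons b u'' =>
      have hb : b ≠ '<' := hint b (by simp)
      have hnp' : ¬ (p1::ptl) <+: ((b::u'') ++ t) := by
        rw [List.cons_append, List.cons_prefix_cons]
        rintro ⟨h1, -⟩
        exact hb (by rw [← h1, hp1])
      rw [ih t (by simp) (fun ch hch => hint ch (List.mem_cons_of_mem _ hch)) hnp']
      simp

-- ---- a '<'-free prefix of a replaced string was already a prefix ----
theorem pvPrefix_preserve (p1 : Char) (ptl r : List Char) (hr : r.head? = some '<') :
    ∀ (t w : List Char), ('<' ∉ w) → w <+: PySem.Chars.replace t (p1::ptl) r → w <+: t := by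
  intro t
  induction ht : t.length using Nat.strong_induction_on generalizing t with
  | _ n ih =>
    subst ht
    intro w hw hpre
    cases t with
    | nil =>
      rw [pvReplace_nil] at hpre
      exact hpre
    | cons c t' =>
      by_cases hp : (p1::ptl) <+: (c::t')
      · obtain ⟨t'', ht''⟩ := hp
        rw [← ht'', pvReplace_prefix] at hpre
        cases w with
        | nil => exact List.nil_prefix
        | cons w0 w' =>
          exfalso
          cases r with
          | nil => simp at hr
          | cons r0 r' =>
            rw [List.cons_append, List.cons_prefix_cons] at hpre
            have : w0 = '<' := by
              rw [hpre.1]; simpa using hr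
            exact hw (by rw [← this]; simp)
      · rw [pvReplace_cons_neg _ _ _ _ _ hp] at hpre
        cases w with
        | nil => exact List.nil_prefix
        | cons w0 w' =>
          rw [List.cons_prefix_cons] at hpre ⊢
          refine ⟨hpre.1, ?_⟩
          exact ih t'.length (by simp) t' rfl w' (fun h => hw (List.mem_cons_of_mem _ h)) hpre.2

-- ---- 'no pattern occurrence at the head' survives replacing the tail ----
theorem pvNotPrefix_preserve (i0 : Char) (wi : List Char) (p1 : Char) (ptl r : List Char)
    (hwi : '<' ∉ wi) (hr : r.head? = some '<') (c : Char) (t : List Char)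
    (h : ¬ (i0::wi) <+: (c::t)) :
    ¬ (i0::wi) <+: (c :: PySem.Chars.replace t (p1::ptl) r) := by
  rw [List.cons_prefix_cons] at h ⊢
  rintro ⟨h1, h2⟩
  exact h ⟨h1, pvPrefix_preserve p1 ptl r hr t wi hwi h2⟩

theorem pvLen1 : (['<', 'd', 'r', '>', '.', '+', '?'] : List Char).length = 7 := by decide
theorem pvLen2 : (['<', 'b', 'r', '>', '.', '+', '?'] : List Char).length = 7 := by decide
theorem pvLen3 : (['<', 'i', 'd', '>', '.', '+', '?'] : List Char).length = 7 := by decide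
theorem pvLen4 : (['<', 'c', 'a', 'm', 'c', 'o', 'l', '>', '.', '+', '?'] : List Char).length = 11 := by decide
theorem pvLen5 : (['<', 'f', 'i', 'l', 't', 'e', 'r', '>', '.', '+', '?'] : List Char).length = 11 := by decide

-- literal forms (rfl) of the five keys / specific patterns
theorem pvNk1 : "<dr>".toList = ['<', 'd', 'r', '>'] := rfl
theorem pvNv1 : "DR\\d{1,2}".toList = ['D', 'R', '\\', 'd', '{', '1', ',', '2', '}'] := rfl
theorem pvNk2 : "<br>".toList = ['<', 'b', 'r', '>'] := rfl
theorem pvNv2 : "[br]".toList = ['[', 'b', 'r', ']'] := rfl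
theorem pvNk3 : "<id>".toList = ['<', 'i', 'd', '>'] := rfl
theorem pvNv3 : ".+?".toList = ['.', '+', '?'] := rfl
theorem pvNk4 : "<camcol>".toList = ['<', 'c', 'a', 'm', 'c', 'o', 'l', '>'] := rfl
theorem pvNv4 : "[1-6]".toList = ['[', '1', '-', '6', ']'] := rfl
theorem pvNk5 : "<filter>".toList = ['<', 'f', 'i', 'l', 't', 'e', 'r', '>'] := rfl
theorem pvNv5 : "[ugriz]".toList = ['[', 'u', 'g', 'r', 'i', 'z', ']'] := rfl
theorem pvNp1 : "<dr>".toList ++ ('.' :: '+' :: '?' :: []) = ['<', 'd', 'r', '>', '.', '+', '?'] := rfl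
theorem pvNr1 : "<dr>".toList ++ "DR\\d{1,2}".toList = ['<', 'd', 'r', '>', 'D', 'R', '\\', 'd', '{', '1', ',', '2', '}'] := rfl
theorem pvNp2 : "<br>".toList ++ ('.' :: '+' :: '?' :: []) = ['<', 'b', 'r', '>', '.', '+', '?'] := rfl
theorem pvNr2 : "<br>".toList ++ "[br]".toList = ['<', 'b', 'r', '>', '[', 'b', 'r', ']'] := rfl
theorem pvNp3 : "<id>".toList ++ ('.' :: '+' :: '?' :: []) = ['<', 'i', 'd', '>', '.', '+', '?'] := rfl
theorem pvNr3 : "<id>".toList ++ ".+?".toList = ['<', 'i', 'd', '>', '.', '+', '?'] := rfl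
theorem pvNp4 : "<camcol>".toList ++ ('.' :: '+' :: '?' :: []) = ['<', 'c', 'a', 'm', 'c', 'o', 'l', '>', '.', '+', '?'] := rfl
theorem pvNr4 : "<camcol>".toList ++ "[1-6]".toList = ['<', 'c', 'a', 'm', 'c', 'o', 'l', '>', '[', '1', '-', '6', ']'] := rfl
theorem pvNp5 : "<filter>".toList ++ ('.' :: '+' :: '?' :: []) = ['<', 'f', 'i', 'l', 't', 'e', 'r', '>', '.', '+', '?'] := rfl
theorem pvNr5 : "<filter>".toList ++ "[ugriz]".toList = ['<', 'f', 'i', 'l', 't', 'e', 'r', '>', '[', 'u', 'g', 'r', 'i', 'z', ']'] := rfl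

theorem pvBlock_all (p1 : Char) (ptl r : List Char) (hp1 : p1 = '<')
    (u : List Char) (hu : u ≠ []) (hint : ∀ ch ∈ u.tail, ch ≠ '<')
    (hnp : ∀ X, ¬ (p1::ptl) <+: (u ++ X)) :
    ∀ t, PySem.Chars.replace (u ++ t) (p1::ptl) r = u ++ PySem.Chars.replace t (p1::ptl) r :=
  fun t => pvReplace_block p1 ptl r hp1 u t hu hint (hnp t)

theorem pvSeq_eq_scan : ∀ (s : List Char), pvSeq pvPats s = pvScan s := by
  intro s
  induction hn : s.length using Nat.strong_induction_on generalizing s with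
  | _ n ih =>
  subst hn
  cases s with
  | nil => rw [pvScan]; decide
  | cons c t =>
    by_cases h1 : (['<', 'd', 'r', '>', '.', '+', '?']) <+: (c :: t)
    · obtain ⟨rest, hres⟩ := h1
      have b1 : (['<', 'd', 'r', '>', '.', '+', '?']).isPrefixOf (c :: t) = true := List.isPrefixOf_iff_prefix.mpr ⟨rest, hres⟩
      rw [pvScan]
      simp only [pvTable, List.find?_nil, List.find?_cons_of_pos, List.find?_cons_of_neg, pvNk1, pvNk2, pvNk3, pvNk4, pvNk5, pvNv1, pvNv2, pvNv3, pvNv4, pvNv5, List.cons_append, List.nil_append, List.length_cons, List.length_nil, Bool.false_eq_true, not_false_eq_true, Nat.reduceAdd, b1]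
      rw [← hres]
      rw [List.drop_left' (pvLen1)]
      simp only [pvSeq, pvPats, pvTable, List.map, List.foldl, pvNp1, pvNp2, pvNp3, pvNp4, pvNp5, pvNr1, pvNr2, pvNr3, pvNr4, pvNr5]
      rw [pvReplace_prefix '<' ['d', 'r', '>', '.', '+', '?'] ['<', 'd', 'r', '>', 'D', 'R', '\\', 'd', '{', '1', ',', '2', '}']]
      rw [pvBlock_all '<' ['b', 'r', '>', '.', '+', '?'] ['<', 'b', 'r', '>', '[', 'b', 'r', ']'] rfl ['<', 'd', 'r', '>', 'D', 'R', '\\', 'd', '{', '1', ',', '2', '}'] (by decide) (by simp)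
          (pvBlocks_not_prefix ['<', 'b', 'r', '>', '.', '+', '?'] ['<', 'd', 'r', '>', 'D', 'R', '\\', 'd', '{', '1', ',', '2', '}'] (by decide) (by decide) (by decide))]
      rw [pvBlock_all '<' ['i', 'd', '>', '.', '+', '?'] ['<', 'i', 'd', '>', '.', '+', '?'] rfl ['<', 'd', 'r', '>', 'D', 'R', '\\', 'd', '{', '1', ',', '2', '}'] (by decide) (by simp)
          (pvBlocks_not_prefix ['<', 'i', 'd', '>', '.', '+', '?'] ['<', 'd', 'r', '>', 'D', 'R', '\\', 'd', '{', '1', ',', '2', '}'] (by decide) (by decide) (by decide))]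
      rw [pvBlock_all '<' ['c', 'a', 'm', 'c', 'o', 'l', '>', '.', '+', '?'] ['<', 'c', 'a', 'm', 'c', 'o', 'l', '>', '[', '1', '-', '6', ']'] rfl ['<', 'd', 'r', '>', 'D', 'R', '\\', 'd', '{', '1', ',', '2', '}'] (by decide) (by simp)
          (pvBlocks_not_prefix ['<', 'c', 'a', 'm', 'c', 'o', 'l', '>', '.', '+', '?'] ['<', 'd', 'r', '>', 'D', 'R', '\\', 'd', '{', '1', ',', '2', '}'] (by decide) (by decide) (by decide))]
      rw [pvBlock_all '<' ['f', 'i', 'l', 't', 'e', 'r', '>', '.', '+', '?'] ['<', 'f', 'i', 'l', 't', 'e', 'r', '>', '[', 'u', 'g', 'r', 'i', 'z', ']'] rfl ['<', 'd', 'r', '>', 'D', 'R', '\\', 'd', '{', '1', ',', '2', '}'] (by decide) (by simp)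
          (pvBlocks_not_prefix ['<', 'f', 'i', 'l', 't', 'e', 'r', '>', '.', '+', '?'] ['<', 'd', 'r', '>', 'D', 'R', '\\', 'd', '{', '1', ',', '2', '}'] (by decide) (by decide) (by decide))]
      have hlen : rest.length < (c :: t).length := by
        have hl2 := congrArg List.length hres
        simp at hl2 ⊢; omega
      have hrec := ih rest.length hlen rest rfl
      simp only [pvSeq, pvPats, pvTable, List.map, List.foldl, pvNp1, pvNp2, pvNp3, pvNp4, pvNp5, pvNr1, pvNr2, pvNr3, pvNr4, pvNr5] at hrec
      rw [hrec]
      simp only [List.cons_append, List.nil_append]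
    ·
      by_cases h2 : (['<', 'b', 'r', '>', '.', '+', '?']) <+: (c :: t)
      · obtain ⟨rest, hres⟩ := h2
        have b1 : (['<', 'd', 'r', '>', '.', '+', '?']).isPrefixOf (c :: t) = false := by
          rw [Bool.eq_false_iff]; exact fun hb => h1 (List.isPrefixOf_iff_prefix.mp hb)
        have b2 : (['<', 'b', 'r', '>', '.', '+', '?']).isPrefixOf (c :: t) = true := List.isPrefixOf_iff_prefix.mpr ⟨rest, hres⟩
        rw [pvScan]
        simp only [pvTable, List.find?_nil, List.find?_cons_of_pos, List.find?_cons_of_neg, pvNk1, pvNk2, pvNk3, pvNk4, pvNk5, pvNv1, pvNv2, pvNv3, pvNv4, pvNv5, List.cons_append, List.nil_append, List.length_cons, List.length_nil, Bool.false_eq_true, not_false_eq_true, Nat.reduceAdd, b1, b2]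
        rw [← hres]
        rw [List.drop_left' (pvLen2)]
        simp only [pvSeq, pvPats, pvTable, List.map, List.foldl, pvNp1, pvNp2, pvNp3, pvNp4, pvNp5, pvNr1, pvNr2, pvNr3, pvNr4, pvNr5]
        rw [pvBlock_all '<' ['d', 'r', '>', '.', '+', '?'] ['<', 'd', 'r', '>', 'D', 'R', '\\', 'd', '{', '1', ',', '2', '}'] rfl ['<', 'b', 'r', '>', '.', '+', '?'] (by decide) (by simp)
            (pvBlocks_not_prefix ['<', 'd', 'r', '>', '.', '+', '?'] ['<', 'b', 'r', '>', '.', '+', '?'] (by decide) (by decide) (by decide))]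
        rw [pvReplace_prefix '<' ['b', 'r', '>', '.', '+', '?'] ['<', 'b', 'r', '>', '[', 'b', 'r', ']']]
        rw [pvBlock_all '<' ['i', 'd', '>', '.', '+', '?'] ['<', 'i', 'd', '>', '.', '+', '?'] rfl ['<', 'b', 'r', '>', '[', 'b', 'r', ']'] (by decide) (by simp)
            (pvBlocks_not_prefix ['<', 'i', 'd', '>', '.', '+', '?'] ['<', 'b', 'r', '>', '[', 'b', 'r', ']'] (by decide) (by decide) (by decide))]
        rw [pvBlock_all '<' ['c', 'a', 'm', 'c', 'o', 'l', '>', '.', '+', '?'] ['<', 'c', 'a', 'm', 'c', 'o', 'l', '>', '[', '1', '-', '6', ']'] rfl ['<', 'b', 'r', '>', '[', 'b', 'r', ']'] (by decide) (by simp)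
            (pvBlocks_not_prefix ['<', 'c', 'a', 'm', 'c', 'o', 'l', '>', '.', '+', '?'] ['<', 'b', 'r', '>', '[', 'b', 'r', ']'] (by decide) (by decide) (by decide))]
        rw [pvBlock_all '<' ['f', 'i', 'l', 't', 'e', 'r', '>', '.', '+', '?'] ['<', 'f', 'i', 'l', 't', 'e', 'r', '>', '[', 'u', 'g', 'r', 'i', 'z', ']'] rfl ['<', 'b', 'r', '>', '[', 'b', 'r', ']'] (by decide) (by simp)
            (pvBlocks_not_prefix ['<', 'f', 'i', 'l', 't', 'e', 'r', '>', '.', '+', '?'] ['<', 'b', 'r', '>', '[', 'b', 'r', ']'] (by decide) (by decide) (by decide))]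
        have hlen : rest.length < (c :: t).length := by
          have hl2 := congrArg List.length hres
          simp at hl2 ⊢; omega
        have hrec := ih rest.length hlen rest rfl
        simp only [pvSeq, pvPats, pvTable, List.map, List.foldl, pvNp1, pvNp2, pvNp3, pvNp4, pvNp5, pvNr1, pvNr2, pvNr3, pvNr4, pvNr5] at hrec
        rw [hrec]
        simp only [List.cons_append, List.nil_append]
      ·
        by_cases h3 : (['<', 'i', 'd', '>', '.', '+', '?']) <+: (c :: t)
        · obtain ⟨rest, hres⟩ := h3
          have b1 : (['<', 'd', 'r', '>', '.', '+', '?']).isPrefixOf (c :: t) = false := by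
            rw [Bool.eq_false_iff]; exact fun hb => h1 (List.isPrefixOf_iff_prefix.mp hb)
          have b2 : (['<', 'b', 'r', '>', '.', '+', '?']).isPrefixOf (c :: t) = false := by
            rw [Bool.eq_false_iff]; exact fun hb => h2 (List.isPrefixOf_iff_prefix.mp hb)
          have b3 : (['<', 'i', 'd', '>', '.', '+', '?']).isPrefixOf (c :: t) = true := List.isPrefixOf_iff_prefix.mpr ⟨rest, hres⟩
          rw [pvScan]
          simp only [pvTable, List.find?_nil, List.find?_cons_of_pos, List.find?_cons_of_neg, pvNk1, pvNk2, pvNk3, pvNk4, pvNk5, pvNv1, pvNv2, pvNv3, pvNv4, pvNv5, List.cons_append, List.nil_append, List.length_cons, List.length_nil, Bool.false_eq_true, not_false_eq_true, Nat.reduceAdd, b1, b2, b3]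
          rw [← hres]
          rw [List.drop_left' (pvLen3)]
          simp only [pvSeq, pvPats, pvTable, List.map, List.foldl, pvNp1, pvNp2, pvNp3, pvNp4, pvNp5, pvNr1, pvNr2, pvNr3, pvNr4, pvNr5]
          rw [pvBlock_all '<' ['d', 'r', '>', '.', '+', '?'] ['<', 'd', 'r', '>', 'D', 'R', '\\', 'd', '{', '1', ',', '2', '}'] rfl ['<', 'i', 'd', '>', '.', '+', '?'] (by decide) (by simp)
              (pvBlocks_not_prefix ['<', 'd', 'r', '>', '.', '+', '?'] ['<', 'i', 'd', '>', '.', '+', '?'] (by decide) (by decide) (by decide))]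
          rw [pvBlock_all '<' ['b', 'r', '>', '.', '+', '?'] ['<', 'b', 'r', '>', '[', 'b', 'r', ']'] rfl ['<', 'i', 'd', '>', '.', '+', '?'] (by decide) (by simp)
              (pvBlocks_not_prefix ['<', 'b', 'r', '>', '.', '+', '?'] ['<', 'i', 'd', '>', '.', '+', '?'] (by decide) (by decide) (by decide))]
          rw [pvReplace_prefix '<' ['i', 'd', '>', '.', '+', '?'] ['<', 'i', 'd', '>', '.', '+', '?']]
          rw [pvBlock_all '<' ['c', 'a', 'm', 'c', 'o', 'l', '>', '.', '+', '?'] ['<', 'c', 'a', 'm', 'c', 'o', 'l', '>', '[', '1', '-', '6', ']'] rfl ['<', 'i', 'd', '>', '.', '+', '?'] (by decide) (by simp)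
              (pvBlocks_not_prefix ['<', 'c', 'a', 'm', 'c', 'o', 'l', '>', '.', '+', '?'] ['<', 'i', 'd', '>', '.', '+', '?'] (by decide) (by decide) (by decide))]
          rw [pvBlock_all '<' ['f', 'i', 'l', 't', 'e', 'r', '>', '.', '+', '?'] ['<', 'f', 'i', 'l', 't', 'e', 'r', '>', '[', 'u', 'g', 'r', 'i', 'z', ']'] rfl ['<', 'i', 'd', '>', '.', '+', '?'] (by decide) (by simp)
              (pvBlocks_not_prefix ['<', 'f', 'i', 'l', 't', 'e', 'r', '>', '.', '+', '?'] ['<', 'i', 'd', '>', '.', '+', '?'] (by decide) (by decide) (by decide))]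
          have hlen : rest.length < (c :: t).length := by
            have hl2 := congrArg List.length hres
            simp at hl2 ⊢; omega
          have hrec := ih rest.length hlen rest rfl
          simp only [pvSeq, pvPats, pvTable, List.map, List.foldl, pvNp1, pvNp2, pvNp3, pvNp4, pvNp5, pvNr1, pvNr2, pvNr3, pvNr4, pvNr5] at hrec
          rw [hrec]
          simp only [List.cons_append, List.nil_append]
        ·
          by_cases h4 : (['<', 'c', 'a', 'm', 'c', 'o', 'l', '>', '.', '+', '?']) <+: (c :: t)
          · obtain ⟨rest, hres⟩ := h4
            have b1 : (['<', 'd', 'r', '>', '.', '+', '?']).isPrefixOf (c :: t) = false := by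
              rw [Bool.eq_false_iff]; exact fun hb => h1 (List.isPrefixOf_iff_prefix.mp hb)
            have b2 : (['<', 'b', 'r', '>', '.', '+', '?']).isPrefixOf (c :: t) = false := by
              rw [Bool.eq_false_iff]; exact fun hb => h2 (List.isPrefixOf_iff_prefix.mp hb)
            have b3 : (['<', 'i', 'd', '>', '.', '+', '?']).isPrefixOf (c :: t) = false := by
              rw [Bool.eq_false_iff]; exact fun hb => h3 (List.isPrefixOf_iff_prefix.mp hb)
            have b4 : (['<', 'c', 'a', 'm', 'c', 'o', 'l', '>', '.', '+', '?']).isPrefixOf (c :: t) = true := List.isPrefixOf_iff_prefix.mpr ⟨rest, hres⟩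
            rw [pvScan]
            simp only [pvTable, List.find?_nil, List.find?_cons_of_pos, List.find?_cons_of_neg, pvNk1, pvNk2, pvNk3, pvNk4, pvNk5, pvNv1, pvNv2, pvNv3, pvNv4, pvNv5, List.cons_append, List.nil_append, List.length_cons, List.length_nil, Bool.false_eq_true, not_false_eq_true, Nat.reduceAdd, b1, b2, b3, b4]
            rw [← hres]
            rw [List.drop_left' (pvLen4)]
            simp only [pvSeq, pvPats, pvTable, List.map, List.foldl, pvNp1, pvNp2, pvNp3, pvNp4, pvNp5, pvNr1, pvNr2, pvNr3, pvNr4, pvNr5]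
            rw [pvBlock_all '<' ['d', 'r', '>', '.', '+', '?'] ['<', 'd', 'r', '>', 'D', 'R', '\\', 'd', '{', '1', ',', '2', '}'] rfl ['<', 'c', 'a', 'm', 'c', 'o', 'l', '>', '.', '+', '?'] (by decide) (by simp)
                (pvBlocks_not_prefix ['<', 'd', 'r', '>', '.', '+', '?'] ['<', 'c', 'a', 'm', 'c', 'o', 'l', '>', '.', '+', '?'] (by decide) (by decide) (by decide))]
            rw [pvBlock_all '<' ['b', 'r', '>', '.', '+', '?'] ['<', 'b', 'r', '>', '[', 'b', 'r', ']'] rfl ['<', 'c', 'a', 'm', 'c', 'o', 'l', '>', '.', '+', '?'] (by decide) (by simp)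
                (pvBlocks_not_prefix ['<', 'b', 'r', '>', '.', '+', '?'] ['<', 'c', 'a', 'm', 'c', 'o', 'l', '>', '.', '+', '?'] (by decide) (by decide) (by decide))]
            rw [pvBlock_all '<' ['i', 'd', '>', '.', '+', '?'] ['<', 'i', 'd', '>', '.', '+', '?'] rfl ['<', 'c', 'a', 'm', 'c', 'o', 'l', '>', '.', '+', '?'] (by decide) (by simp)
                (pvBlocks_not_prefix ['<', 'i', 'd', '>', '.', '+', '?'] ['<', 'c', 'a', 'm', 'c', 'o', 'l', '>', '.', '+', '?'] (by decide) (by decide) (by decide))]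
            rw [pvReplace_prefix '<' ['c', 'a', 'm', 'c', 'o', 'l', '>', '.', '+', '?'] ['<', 'c', 'a', 'm', 'c', 'o', 'l', '>', '[', '1', '-', '6', ']']]
            rw [pvBlock_all '<' ['f', 'i', 'l', 't', 'e', 'r', '>', '.', '+', '?'] ['<', 'f', 'i', 'l', 't', 'e', 'r', '>', '[', 'u', 'g', 'r', 'i', 'z', ']'] rfl ['<', 'c', 'a', 'm', 'c', 'o', 'l', '>', '[', '1', '-', '6', ']'] (by decide) (by simp)
                (pvBlocks_not_prefix ['<', 'f', 'i', 'l', 't', 'e', 'r', '>', '.', '+', '?'] ['<', 'c', 'a', 'm', 'c', 'o', 'l', '>', '[', '1', '-', '6', ']'] (by decide) (by decide) (by decide))]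
            have hlen : rest.length < (c :: t).length := by
              have hl2 := congrArg List.length hres
              simp at hl2 ⊢; omega
            have hrec := ih rest.length hlen rest rfl
            simp only [pvSeq, pvPats, pvTable, List.map, List.foldl, pvNp1, pvNp2, pvNp3, pvNp4, pvNp5, pvNr1, pvNr2, pvNr3, pvNr4, pvNr5] at hrec
            rw [hrec]
            simp only [List.cons_append, List.nil_append]
          ·
            by_cases h5 : (['<', 'f', 'i', 'l', 't', 'e', 'r', '>', '.', '+', '?']) <+: (c :: t)
            · obtain ⟨rest, hres⟩ := h5
              have b1 : (['<', 'd', 'r', '>', '.', '+', '?']).isPrefixOf (c :: t) = false := by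
                rw [Bool.eq_false_iff]; exact fun hb => h1 (List.isPrefixOf_iff_prefix.mp hb)
              have b2 : (['<', 'b', 'r', '>', '.', '+', '?']).isPrefixOf (c :: t) = false := by
                rw [Bool.eq_false_iff]; exact fun hb => h2 (List.isPrefixOf_iff_prefix.mp hb)
              have b3 : (['<', 'i', 'd', '>', '.', '+', '?']).isPrefixOf (c :: t) = false := by
                rw [Bool.eq_false_iff]; exact fun hb => h3 (List.isPrefixOf_iff_prefix.mp hb)
              have b4 : (['<', 'c', 'a', 'm', 'c', 'o', 'l', '>', '.', '+', '?']).isPrefixOf (c :: t) = false := by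
                rw [Bool.eq_false_iff]; exact fun hb => h4 (List.isPrefixOf_iff_prefix.mp hb)
              have b5 : (['<', 'f', 'i', 'l', 't', 'e', 'r', '>', '.', '+', '?']).isPrefixOf (c :: t) = true := List.isPrefixOf_iff_prefix.mpr ⟨rest, hres⟩
              rw [pvScan]
              simp only [pvTable, List.find?_nil, List.find?_cons_of_pos, List.find?_cons_of_neg, pvNk1, pvNk2, pvNk3, pvNk4, pvNk5, pvNv1, pvNv2, pvNv3, pvNv4, pvNv5, List.cons_append, List.nil_append, List.length_cons, List.length_nil, Bool.false_eq_true, not_false_eq_true, Nat.reduceAdd, b1, b2, b3, b4, b5]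
              rw [← hres]
              rw [List.drop_left' (pvLen5)]
              simp only [pvSeq, pvPats, pvTable, List.map, List.foldl, pvNp1, pvNp2, pvNp3, pvNp4, pvNp5, pvNr1, pvNr2, pvNr3, pvNr4, pvNr5]
              rw [pvBlock_all '<' ['d', 'r', '>', '.', '+', '?'] ['<', 'd', 'r', '>', 'D', 'R', '\\', 'd', '{', '1', ',', '2', '}'] rfl ['<', 'f', 'i', 'l', 't', 'e', 'r', '>', '.', '+', '?'] (by decide) (by simp)
                  (pvBlocks_not_prefix ['<', 'd', 'r', '>', '.', '+', '?'] ['<', 'f', 'i', 'l', 't', 'e', 'r', '>', '.', '+', '?'] (by decide) (by decide) (by decide))]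
              rw [pvBlock_all '<' ['b', 'r', '>', '.', '+', '?'] ['<', 'b', 'r', '>', '[', 'b', 'r', ']'] rfl ['<', 'f', 'i', 'l', 't', 'e', 'r', '>', '.', '+', '?'] (by decide) (by simp)
                  (pvBlocks_not_prefix ['<', 'b', 'r', '>', '.', '+', '?'] ['<', 'f', 'i', 'l', 't', 'e', 'r', '>', '.', '+', '?'] (by decide) (by decide) (by decide))]
              rw [pvBlock_all '<' ['i', 'd', '>', '.', '+', '?'] ['<', 'i', 'd', '>', '.', '+', '?'] rfl ['<', 'f', 'i', 'l', 't', 'e', 'r', '>', '.', '+', '?'] (by decide) (by simp)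
                  (pvBlocks_not_prefix ['<', 'i', 'd', '>', '.', '+', '?'] ['<', 'f', 'i', 'l', 't', 'e', 'r', '>', '.', '+', '?'] (by decide) (by decide) (by decide))]
              rw [pvBlock_all '<' ['c', 'a', 'm', 'c', 'o', 'l', '>', '.', '+', '?'] ['<', 'c', 'a', 'm', 'c', 'o', 'l', '>', '[', '1', '-', '6', ']'] rfl ['<', 'f', 'i', 'l', 't', 'e', 'r', '>', '.', '+', '?'] (by decide) (by simp)
                  (pvBlocks_not_prefix ['<', 'c', 'a', 'm', 'c', 'o', 'l', '>', '.', '+', '?'] ['<', 'f', 'i', 'l', 't', 'e', 'r', '>', '.', '+', '?'] (by decide) (by decide) (by decide))]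
              rw [pvReplace_prefix '<' ['f', 'i', 'l', 't', 'e', 'r', '>', '.', '+', '?'] ['<', 'f', 'i', 'l', 't', 'e', 'r', '>', '[', 'u', 'g', 'r', 'i', 'z', ']']]
              have hlen : rest.length < (c :: t).length := by
                have hl2 := congrArg List.length hres
                simp at hl2 ⊢; omega
              have hrec := ih rest.length hlen rest rfl
              simp only [pvSeq, pvPats, pvTable, List.map, List.foldl, pvNp1, pvNp2, pvNp3, pvNp4, pvNp5, pvNr1, pvNr2, pvNr3, pvNr4, pvNr5] at hrec
              rw [hrec]
              simp only [List.cons_append, List.nil_append]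
            ·
              have b1 : (['<', 'd', 'r', '>', '.', '+', '?']).isPrefixOf (c :: t) = false := by
                rw [Bool.eq_false_iff]; exact fun hb => h1 (List.isPrefixOf_iff_prefix.mp hb)
              have b2 : (['<', 'b', 'r', '>', '.', '+', '?']).isPrefixOf (c :: t) = false := by
                rw [Bool.eq_false_iff]; exact fun hb => h2 (List.isPrefixOf_iff_prefix.mp hb)
              have b3 : (['<', 'i', 'd', '>', '.', '+', '?']).isPrefixOf (c :: t) = false := by
                rw [Bool.eq_false_iff]; exact fun hb => h3 (List.isPrefixOf_iff_prefix.mp hb)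
              have b4 : (['<', 'c', 'a', 'm', 'c', 'o', 'l', '>', '.', '+', '?']).isPrefixOf (c :: t) = false := by
                rw [Bool.eq_false_iff]; exact fun hb => h4 (List.isPrefixOf_iff_prefix.mp hb)
              have b5 : (['<', 'f', 'i', 'l', 't', 'e', 'r', '>', '.', '+', '?']).isPrefixOf (c :: t) = false := by
                rw [Bool.eq_false_iff]; exact fun hb => h5 (List.isPrefixOf_iff_prefix.mp hb)
              rw [pvScan]
              simp only [pvTable, List.find?_nil, List.find?_cons_of_pos, List.find?_cons_of_neg, pvNk1, pvNk2, pvNk3, pvNk4, pvNk5, pvNv1, pvNv2, pvNv3, pvNv4, pvNv5, List.cons_append, List.nil_append, List.length_cons, List.length_nil, Bool.false_eq_true, not_false_eq_true, Nat.reduceAdd, b1, b2, b3, b4, b5]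
              simp only [pvSeq, pvPats, pvTable, List.map, List.foldl, pvNp1, pvNp2, pvNp3, pvNp4, pvNp5, pvNr1, pvNr2, pvNr3, pvNr4, pvNr5]
              rw [pvReplace_cons_neg '<' ['d', 'r', '>', '.', '+', '?'] ['<', 'd', 'r', '>', 'D', 'R', '\\', 'd', '{', '1', ',', '2', '}'] c _ h1]
              have g2_1 : ¬ (['<', 'b', 'r', '>', '.', '+', '?']) <+: (c :: PySem.Chars.replace t ['<', 'd', 'r', '>', '.', '+', '?'] ['<', 'd', 'r', '>', 'D', 'R', '\\', 'd', '{', '1', ',', '2', '}']) :=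
                pvNotPrefix_preserve '<' ['b', 'r', '>', '.', '+', '?'] '<' ['d', 'r', '>', '.', '+', '?'] ['<', 'd', 'r', '>', 'D', 'R', '\\', 'd', '{', '1', ',', '2', '}'] (by decide) rfl c t h2
              rw [pvReplace_cons_neg '<' ['b', 'r', '>', '.', '+', '?'] ['<', 'b', 'r', '>', '[', 'b', 'r', ']'] c _ g2_1]
              have g3_1 : ¬ (['<', 'i', 'd', '>', '.', '+', '?']) <+: (c :: PySem.Chars.replace t ['<', 'd', 'r', '>', '.', '+', '?'] ['<', 'd', 'r', '>', 'D', 'R', '\\', 'd', '{', '1', ',', '2', '}']) :=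
                pvNotPrefix_preserve '<' ['i', 'd', '>', '.', '+', '?'] '<' ['d', 'r', '>', '.', '+', '?'] ['<', 'd', 'r', '>', 'D', 'R', '\\', 'd', '{', '1', ',', '2', '}'] (by decide) rfl c t h3
              have g3_2 : ¬ (['<', 'i', 'd', '>', '.', '+', '?']) <+: (c :: PySem.Chars.replace (PySem.Chars.replace t ['<', 'd', 'r', '>', '.', '+', '?'] ['<', 'd', 'r', '>', 'D', 'R', '\\', 'd', '{', '1', ',', '2', '}']) ['<', 'b', 'r', '>', '.', '+', '?'] ['<', 'b', 'r', '>', '[', 'b', 'r', ']']) :=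
                pvNotPrefix_preserve '<' ['i', 'd', '>', '.', '+', '?'] '<' ['b', 'r', '>', '.', '+', '?'] ['<', 'b', 'r', '>', '[', 'b', 'r', ']'] (by decide) rfl c (PySem.Chars.replace t ['<', 'd', 'r', '>', '.', '+', '?'] ['<', 'd', 'r', '>', 'D', 'R', '\\', 'd', '{', '1', ',', '2', '}']) g3_1
              rw [pvReplace_cons_neg '<' ['i', 'd', '>', '.', '+', '?'] ['<', 'i', 'd', '>', '.', '+', '?'] c _ g3_2]
              have g4_1 : ¬ (['<', 'c', 'a', 'm', 'c', 'o', 'l', '>', '.', '+', '?']) <+: (c :: PySem.Chars.replace t ['<', 'd', 'r', '>', '.', '+', '?'] ['<', 'd', 'r', '>', 'D', 'R', '\\', 'd', '{', '1', ',', '2', '}']) :=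
                pvNotPrefix_preserve '<' ['c', 'a', 'm', 'c', 'o', 'l', '>', '.', '+', '?'] '<' ['d', 'r', '>', '.', '+', '?'] ['<', 'd', 'r', '>', 'D', 'R', '\\', 'd', '{', '1', ',', '2', '}'] (by decide) rfl c t h4
              have g4_2 : ¬ (['<', 'c', 'a', 'm', 'c', 'o', 'l', '>', '.', '+', '?']) <+: (c :: PySem.Chars.replace (PySem.Chars.replace t ['<', 'd', 'r', '>', '.', '+', '?'] ['<', 'd', 'r', '>', 'D', 'R', '\\', 'd', '{', '1', ',', '2', '}']) ['<', 'b', 'r', '>', '.', '+', '?'] ['<', 'b', 'r', '>', '[', 'b', 'r', ']']) :=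
                pvNotPrefix_preserve '<' ['c', 'a', 'm', 'c', 'o', 'l', '>', '.', '+', '?'] '<' ['b', 'r', '>', '.', '+', '?'] ['<', 'b', 'r', '>', '[', 'b', 'r', ']'] (by decide) rfl c (PySem.Chars.replace t ['<', 'd', 'r', '>', '.', '+', '?'] ['<', 'd', 'r', '>', 'D', 'R', '\\', 'd', '{', '1', ',', '2', '}']) g4_1
              have g4_3 : ¬ (['<', 'c', 'a', 'm', 'c', 'o', 'l', '>', '.', '+', '?']) <+: (c :: PySem.Chars.replace (PySem.Chars.replace (PySem.Chars.replace t ['<', 'd', 'r', '>', '.', '+', '?'] ['<', 'd', 'r', '>', 'D', 'R', '\\', 'd', '{', '1', ',', '2', '}']) ['<', 'b', 'r', '>', '.', '+', '?'] ['<', 'b', 'r', '>', '[', 'b', 'r', ']']) ['<', 'i', 'd', '>', '.', '+', '?'] ['<', 'i', 'd', '>', '.', '+', '?']) :=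
                pvNotPrefix_preserve '<' ['c', 'a', 'm', 'c', 'o', 'l', '>', '.', '+', '?'] '<' ['i', 'd', '>', '.', '+', '?'] ['<', 'i', 'd', '>', '.', '+', '?'] (by decide) rfl c (PySem.Chars.replace (PySem.Chars.replace t ['<', 'd', 'r', '>', '.', '+', '?'] ['<', 'd', 'r', '>', 'D', 'R', '\\', 'd', '{', '1', ',', '2', '}']) ['<', 'b', 'r', '>', '.', '+', '?'] ['<', 'b', 'r', '>', '[', 'b', 'r', ']']) g4_2
              rw [pvReplace_cons_neg '<' ['c', 'a', 'm', 'c', 'o', 'l', '>', '.', '+', '?'] ['<', 'c', 'a', 'm', 'c', 'o', 'l', '>', '[', '1', '-', '6', ']'] c _ g4_3]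
              have g5_1 : ¬ (['<', 'f', 'i', 'l', 't', 'e', 'r', '>', '.', '+', '?']) <+: (c :: PySem.Chars.replace t ['<', 'd', 'r', '>', '.', '+', '?'] ['<', 'd', 'r', '>', 'D', 'R', '\\', 'd', '{', '1', ',', '2', '}']) :=
                pvNotPrefix_preserve '<' ['f', 'i', 'l', 't', 'e', 'r', '>', '.', '+', '?'] '<' ['d', 'r', '>', '.', '+', '?'] ['<', 'd', 'r', '>', 'D', 'R', '\\', 'd', '{', '1', ',', '2', '}'] (by decide) rfl c t h5
              have g5_2 : ¬ (['<', 'f', 'i', 'l', 't', 'e', 'r', '>', '.', '+', '?']) <+: (c :: PySem.Chars.replace (PySem.Chars.replace t ['<', 'd', 'r', '>', '.', '+', '?'] ['<', 'd', 'r', '>', 'D', 'R', '\\', 'd', '{', '1', ',', '2', '}']) ['<', 'b', 'r', '>', '.', '+', '?'] ['<', 'b', 'r', '>', '[', 'b', 'r', ']']) :=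
                pvNotPrefix_preserve '<' ['f', 'i', 'l', 't', 'e', 'r', '>', '.', '+', '?'] '<' ['b', 'r', '>', '.', '+', '?'] ['<', 'b', 'r', '>', '[', 'b', 'r', ']'] (by decide) rfl c (PySem.Chars.replace t ['<', 'd', 'r', '>', '.', '+', '?'] ['<', 'd', 'r', '>', 'D', 'R', '\\', 'd', '{', '1', ',', '2', '}']) g5_1
              have g5_3 : ¬ (['<', 'f', 'i', 'l', 't', 'e', 'r', '>', '.', '+', '?']) <+: (c :: PySem.Chars.replace (PySem.Chars.replace (PySem.Chars.replace t ['<', 'd', 'r', '>', '.', '+', '?'] ['<', 'd', 'r', '>', 'D', 'R', '\\', 'd', '{', '1', ',', '2', '}']) ['<', 'b', 'r', '>', '.', '+', '?'] ['<', 'b', 'r', '>', '[', 'b', 'r', ']']) ['<', 'i', 'd', '>', '.', '+', '?'] ['<', 'i', 'd', '>', '.', '+', '?']) :=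
                pvNotPrefix_preserve '<' ['f', 'i', 'l', 't', 'e', 'r', '>', '.', '+', '?'] '<' ['i', 'd', '>', '.', '+', '?'] ['<', 'i', 'd', '>', '.', '+', '?'] (by decide) rfl c (PySem.Chars.replace (PySem.Chars.replace t ['<', 'd', 'r', '>', '.', '+', '?'] ['<', 'd', 'r', '>', 'D', 'R', '\\', 'd', '{', '1', ',', '2', '}']) ['<', 'b', 'r', '>', '.', '+', '?'] ['<', 'b', 'r', '>', '[', 'b', 'r', ']']) g5_2
              have g5_4 : ¬ (['<', 'f', 'i', 'l', 't', 'e', 'r', '>', '.', '+', '?']) <+: (c :: PySem.Chars.replace (PySem.Chars.replace (PySem.Chars.replace (PySem.Chars.replace t ['<', 'd', 'r', '>', '.', '+', '?'] ['<', 'd', 'r', '>', 'D', 'R', '\\', 'd', '{', '1', ',', '2', '}']) ['<', 'b', 'r', '>', '.', '+', '?'] ['<', 'b', 'r', '>', '[', 'b', 'r', ']']) ['<', 'i', 'd', '>', '.', '+', '?'] ['<', 'i', 'd', '>', '.', '+', '?']) ['<', 'c', 'a', 'm', 'c', 'o', 'l', '>', '.', '+', '?'] ['<', 'c', 'a', 'm',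 'c', 'o', 'l', '>', '[', '1', '-', '6', ']']) :=
                pvNotPrefix_preserve '<' ['f', 'i', 'l', 't', 'e', 'r', '>', '.', '+', '?'] '<' ['c', 'a', 'm', 'c', 'o', 'l', '>', '.', '+', '?'] ['<', 'c', 'a', 'm', 'c', 'o', 'l', '>', '[', '1', '-', '6', ']'] (by decide) rfl c (PySem.Chars.replace (PySem.Chars.replace (PySem.Chars.replace t ['<', 'd', 'r', '>', '.', '+', '?'] ['<', 'd', 'r', '>', 'D', 'R', '\\', 'd', '{', '1', ',', '2', '}']) ['<', 'b', 'r', '>', '.', '+', '?'] ['<', 'b', 'r', '>', '[', 'b', 'r', ']']) ['<', 'i', 'd', '>', '.', '+', '?'] ['<', 'i', 'd', '>', '.', '+', '?']) g5_3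
              rw [pvReplace_cons_neg '<' ['f', 'i', 'l', 't', 'e', 'r', '>', '.', '+', '?'] ['<', 'f', 'i', 'l', 't', 'e', 'r', '>', '[', 'u', 'g', 'r', 'i', 'z', ']'] c _ g5_4]
              have hrec := ih t.length (by simp) t rfl
              simp only [pvSeq, pvPats, pvTable, List.map, List.foldl, pvNp1, pvNp2, pvNp3, pvNp4, pvNp5, pvNr1, pvNr2, pvNr3, pvNr4, pvNr5] at hrec
              rw [hrec]


-- ---- A-side bridge: one loop step over strings is one replace over char lists ----
theorem pvStep_eq (key mv : String) (k1 : Char) (ktl : List Char) (hk : key.toList = k1 :: ktl)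
    (v : String) :
    ((if PySem.Str.isIn key v = false then v
      else PySem.Str.replace v (key ++ ".+?") (key ++ mv))).toList
      = PySem.Chars.replace v.toList (key.toList ++ ('.' :: '+' :: '?' :: []))
          (key.toList ++ mv.toList) := by
  by_cases h : PySem.Str.isIn key v = false
  · rw [if_pos h]
    have hin : ¬ key.toList <:+: v.toList := by
      rw [PySem.Str.isIn_eq] at h
      exact (PySem.Chars.isIn_eq_false_iff _ _).mp h
    rw [hk]
    exact (pvReplace_id (k1::ktl) k1 (ktl ++ ('.' :: '+' :: '?' :: [])) _
      (by simpa using List.prefix_append ktl _) v.toList (by rw [← hk]; exact hin)).symm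
  · rw [if_neg h, PySem.Str.toList_replace, String.toList_append, String.toList_append]
    rfl

theorem pvKeys_eq : pvMappingA.keys = ["<dr>", "<br>", "<id>", "<camcol>", "<filter>"] := by decide

theorem pvBridgeA (v : String) : (remap_patterns v).toList = pvSeq pvPats v.toList := by
  unfold remap_patterns
  rw [pvKeys_eq]
  simp only [List.foldl]
  rw [pvStep_eq "<filter>" _ '<' "filter>".toList (by decide) _,
      pvStep_eq "<camcol>" _ '<' "camcol>".toList (by decide) _,
      pvStep_eq "<id>" _ '<' "id>".toList (by decide) _,
      pvStep_eq "<br>" _ '<' "br>".toList (by decide) _,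
      pvStep_eq "<dr>" _ '<' "dr>".toList (by decide) _]
  have g1 : pvMappingA.getD "<dr>" ".+?" = "DR\\d{1,2}" := by decide
  have g2 : pvMappingA.getD "<br>" ".+?" = "[br]" := by decide
  have g3 : pvMappingA.getD "<id>" ".+?" = ".+?" := by decide
  have g4 : pvMappingA.getD "<camcol>" ".+?" = "[1-6]" := by decide
  have g5 : pvMappingA.getD "<filter>" ".+?" = "[ugriz]" := by decide
  rw [g1, g2, g3, g4, g5]
  simp only [pvSeq, pvPats, pvTable, List.map, List.foldl]

-- ===== VERDICT (by name: the statement is the Claim_ definition above) =====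
theorem remap_patterns_spec : Claim_equal_remap_patterns := by
  intro value _
  unfold Spec_remap_patterns remap_patterns_alt
  apply String.toList_inj.mp
  rw [String.toList_ofList, pvBridgeA, pvSeq_eq_scan]
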